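-- pv_equiv track=rewrite | github.com/EngelLaG/Ahmed-s-Cipher | encrypt.py | encrypt_file
-- ===== SOURCE A (Python) =====
-- def encrypt_file(key, temp_string):
--     temp = []
--     temp_num = 0
--     ende = ""
--
--     for i in range(key):
--         temp.append([])
--     for j in temp_string:
--         temp[temp_num].append(j)
--         temp_num += 1
--         if temp_num == key: temp_num = 0
--     for i in range(key):
--         for j in temp[i]:
--             ende += j
--
--     return ende
-- ===== SOURCE B (Python) =====
-- def encrypt_file(key, temp_string):
--     out = []
--     for r in range(key):
--         chunk = temp_string[r:]
--         while chunk: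
--             out.append(chunk[0])
--             chunk = chunk[key:]
--     return "".join(out)
-- ===== Notes on version B (the rewrite author's own statement) =====
-- stated objective: alternative
-- what changed: Instead of one pass distributing characters into key buckets with a rotating counter and then concatenating the buckets, B makes key stride-gather passes: for each residue r it walks the suffix temp_string[r:] taking the first character and jumping key ahead, appending straight to the output.
import Mathlib
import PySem

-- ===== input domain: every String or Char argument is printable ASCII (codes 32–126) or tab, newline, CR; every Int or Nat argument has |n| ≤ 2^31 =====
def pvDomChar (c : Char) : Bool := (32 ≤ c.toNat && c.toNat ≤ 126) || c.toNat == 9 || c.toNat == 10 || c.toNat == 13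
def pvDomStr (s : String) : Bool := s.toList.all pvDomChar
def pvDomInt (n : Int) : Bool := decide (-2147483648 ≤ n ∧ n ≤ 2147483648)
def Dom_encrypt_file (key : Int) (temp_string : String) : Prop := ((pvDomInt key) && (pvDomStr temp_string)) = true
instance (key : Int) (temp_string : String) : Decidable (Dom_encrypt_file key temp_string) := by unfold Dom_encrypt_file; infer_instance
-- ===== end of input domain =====

-- B replaces A's one rotating-counter distribution pass over `key` buckets by `key`
-- stride-gather passes over suffixes (more idiomatic); return-value equivalence only.


-- ===== PORT A =====
-- one step of A's distribution loop: temp[temp_num].append(j); temp_num += 1; wrap at key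
def pvStepA (key : Int) (st : List (List Char) × Int) (j : Char) : List (List Char) × Int :=
  let temp := st.1.set st.2.toNat (st.1.getD st.2.toNat [] ++ [j])
  let tn := st.2 + 1
  (temp, if tn = key then 0 else tn)

def encrypt_file (key : Int) (temp_string : String) : String :=
  -- for i in range(key): temp.append([])
  let temp : List (List Char) := (PySem.List.pyRange 0 key 1).map (fun _ => ([] : List Char))
  -- for j in temp_string: …
  let st := temp_string.toList.foldl (pvStepA key) (temp, 0)
  -- for i in range(key): for j in temp[i]: ende += j
  String.mk ((PySem.List.pyRange 0 key 1).foldl (fun acc i => acc ++ st.1.getD i.toNat []) [])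

-- ===== PORT B =====
-- the while-loop of Source B on `chunk`: take chunk[0], continue with chunk[key:]
-- (chunk[key:] on x :: xs is xs.drop (key-1))
def pvGather (k : Nat) : List Char → List Char
  | [] => []
  | x :: xs => x :: pvGather k (xs.drop (k - 1))
termination_by l => l.length
decreasing_by simp
def encrypt_file_alt (key : Int) (temp_string : String) : String :=
  String.mk ((PySem.List.pyRange 0 key 1).foldl
    (fun out r => out ++ pvGather key.toNat (temp_string.toList.drop r.toNat)) [])

-- ===== PRECONDITION & SPEC =====
-- Pre_ excludes exactly the inputs on which A raises IndexError (key <= 0 with a nonempty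
-- string: A indexes into an empty bucket list); B's empty range(key) loop returns "" there.
def Pre_encrypt_file (key : Int) (temp_string : String) : Prop := 1 ≤ key ∨ temp_string = ""
instance (key : Int) (temp_string : String) : Decidable (Pre_encrypt_file key temp_string) := by unfold Pre_encrypt_file; infer_instance
def pvWitness_encrypt_file : Int × String := (3, "attack at dawn")

def Spec_encrypt_file (key : Int) (temp_string : String) (out : String) : Prop := out = encrypt_file_alt key temp_string
instance (key : Int) (temp_string : String) (out : String) : Decidable (Spec_encrypt_file key temp_string out) := by unfold Spec_encrypt_file; infer_instance

-- ===== CLAIM (what is proved, stated in full; the proofs are below) =====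
def Claim_equal_encrypt_file : Prop := ∀ (key : Int) (temp_string : String), Dom_encrypt_file key temp_string → Pre_encrypt_file key temp_string → Spec_encrypt_file key temp_string (encrypt_file key temp_string)

-- ===== LEMMAS AND PROOFS =====

lemma pvGather_nil (k : Nat) : pvGather k [] = [] := by rw [pvGather]

lemma pvGather_cons (k : Nat) (x : Char) (xs : List Char) :
    pvGather k (x :: xs) = x :: pvGather k (xs.drop (k - 1)) := by rw [pvGather]

lemma pv_getD_set (B : List (List Char)) (t i : Nat) (v : List Char) (ht : t < B.length) :
    (B.set t v).getD i [] = if i = t then v else B.getD i [] := by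
  by_cases h : i = t
  · subst h; simp [List.getD, ht]
  · simp [List.getD, h, Ne.symm h]

-- A's distribution-loop invariant: starting at counter t, bucket i finally holds its old
-- contents followed by the stride-gather of l from offset (i - t) mod key.
lemma pv_inv (key : Int) (hk : 1 ≤ key) (l : List Char) :
    ∀ (B : List (List Char)) (t : Nat), B.length = key.toNat → t < key.toNat →
    ∀ i : Nat, i < key.toNat →
    (l.foldl (pvStepA key) (B, (t : Int))).1.getD i [] =
      B.getD i [] ++ pvGather key.toNat (l.drop (if t ≤ i then i - t else i + key.toNat - t)) := by
  induction l with
  | nil => intro B t hB ht i hi; simp [pvGather_nil]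
  | cons x xs ih =>
    intro B t hB ht i hi
    have hBt : t < B.length := by omega
    have hstep : pvStepA key (B, (t : Int)) x
        = (B.set t (B.getD t [] ++ [x]), ((if t + 1 = key.toNat then 0 else t + 1 : Nat) : Int)) := by
      simp only [pvStepA, Int.toNat_natCast]
      by_cases h : t + 1 = key.toNat
      · have h2 : (t : Int) + 1 = key := by omega
        simp [h, h2]
      · have h2 : ¬ ((t : Int) + 1 = key) := by omega
        simp [h, h2]
    rw [List.foldl_cons, hstep,
        ih (B.set t (B.getD t [] ++ [x])) (if t + 1 = key.toNat then 0 else t + 1)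
          (by simp [hB]) (by split <;> omega) i hi]
    rw [pv_getD_set B t i _ hBt]
    by_cases hit : i = t
    · subst hit
      have harg : (if (if i + 1 = key.toNat then 0 else i + 1) ≤ i then
            i - (if i + 1 = key.toNat then 0 else i + 1)
          else i + key.toNat - (if i + 1 = key.toNat then 0 else i + 1)) = key.toNat - 1 := by
        split_ifs <;> omega
      rw [harg]
      simp [pvGather_cons]
    · have hne : i ≠ t := hit
      have hr1 : (1:Nat) ≤ (if t ≤ i then i - t else i + key.toNat - t) := by
        split_ifs <;> omega
      have harg : (if (if t + 1 = key.toNat then 0 else t + 1) ≤ i then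
            i - (if t + 1 = key.toNat then 0 else t + 1)
          else i + key.toNat - (if t + 1 = key.toNat then 0 else t + 1))
          = (if t ≤ i then i - t else i + key.toNat - t) - 1 := by
        split_ifs <;> omega
      rw [harg]
      obtain ⟨m, hm⟩ := Nat.exists_eq_add_of_le hr1
      rw [hm]
      simp [hit, List.drop_succ_cons, Nat.add_comm 1 m]

-- ===== VERDICT (by name: the statement is the Claim_ definition above) =====
theorem encrypt_file_spec : Claim_equal_encrypt_file := by
  intro key s _ hpre
  show encrypt_file key s = encrypt_file_alt key s
  simp only [encrypt_file, encrypt_file_alt]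
  by_cases hk : 1 ≤ key
  · refine congrArg String.mk ?_
    apply PySem.List.foldl_congr_mem
    intro acc r hr
    rw [PySem.List.mem_pyRange_one] at hr
    have hrk : r.toNat < key.toNat := by omega
    have hinv := pv_inv key hk s.toList ((PySem.List.pyRange 0 key 1).map (fun _ => [])) 0
       (by simp [PySem.List.length_pyRange_one]) (by omega) r.toNat hrk
    simp only [Nat.cast_zero] at hinv
    rw [hinv]
    simp
  · have hs : s = "" := by rcases hpre with h|h; omega; exact h
    subst hs
    rw [PySem.List.pyRange_one_eq_nil (by omega)]
    rfl
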